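-- pv_equiv track=rewrite | github.com/ancho85/sublimetext-playero-plugin | libs/tools.py | escapeAnyToString
-- ===== SOURCE A (Python) =====
-- def escapeAnyToString(text):
--     integers = tuple((x, "0%s") for x in ['%d', '%i', '%o', '%u', '%x', '%X'])
--     decimals = tuple((x, "0%s") for x in ['%e', '%E', '%f', '%F', '%g', '%G'])
--     strings  = tuple((x, "%s") for x in ['%c', '%r'])
--     for k, v in integers:
--         text = text.replace(k, v)
--     for k, v in decimals:
--         text = text.replace(k, v)
--     for k, v in strings:
--         text = text.replace(k, v)
--     return text
-- ===== SOURCE B (Python) =====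
-- def escapeAnyToString(text):
--     out = []
--     i = 0
--     n = len(text)
--     while i < n:
--         ch = text[i]
--         if ch == '%' and i + 1 < n:
--             nxt = text[i + 1]
--             if nxt in 'diouxXeEfFgG':
--                 out.append('0%s')
--                 i += 2
--                 continue
--             if nxt in 'cr':
--                 out.append('%s')
--                 i += 2
--                 continue
--         out.append(ch)
--         i += 1
--     return ''.join(out)
-- ===== Notes on version B (the rewrite author's own statement) =====
-- stated objective: alternative
-- what changed: Replaces A's 14 sequential whole-string str.replace passes with a single left-to-right scan that, at each '%', dispatches on the following character via membership in the specifier letters and emits '0%s' or '%s' directly.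
import Mathlib
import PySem

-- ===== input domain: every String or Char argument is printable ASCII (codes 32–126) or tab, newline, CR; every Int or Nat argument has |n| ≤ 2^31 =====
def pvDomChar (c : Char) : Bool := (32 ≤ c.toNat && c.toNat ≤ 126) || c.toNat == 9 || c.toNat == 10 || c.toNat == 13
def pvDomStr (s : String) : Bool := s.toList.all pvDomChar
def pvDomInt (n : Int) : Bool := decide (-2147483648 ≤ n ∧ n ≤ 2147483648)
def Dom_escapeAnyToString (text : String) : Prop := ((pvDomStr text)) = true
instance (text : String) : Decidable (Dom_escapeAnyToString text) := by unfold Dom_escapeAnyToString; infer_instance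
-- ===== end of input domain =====

-- B replaces A's 14 sequential str.replace passes by a single left-to-right scan that
-- dispatches on the character after '%' (objective: alternative — one traversal instead of 14).

-- ===== PORT A =====
-- A: build three tuples of (specifier, replacement) pairs, then apply text.replace sequentially.
def escapeAnyToString (text : String) : String :=
  let integers := (["%d", "%i", "%o", "%u", "%x", "%X"].map (fun x => (x, "0%s")))
  let decimals := (["%e", "%E", "%f", "%F", "%g", "%G"].map (fun x => (x, "0%s")))
  let strings  := (["%c", "%r"].map (fun x => (x, "%s")))
  let text := integers.foldl (fun t kv => PySem.Str.replace t kv.1 kv.2) text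
  let text := decimals.foldl (fun t kv => PySem.Str.replace t kv.1 kv.2) text
  let text := strings.foldl (fun t kv => PySem.Str.replace t kv.1 kv.2) text
  text

-- ===== PORT B =====
-- B: one pass over the characters; at '%' look at the next character and emit the mapped
-- replacement ("0%s" for int/float specifiers, "%s" for %c/%r), otherwise copy the character.
def escScanL : List Char → List Char
  | [] => []
  | [a] => [a]
  | a :: b :: t =>
    if a = '%' ∧ b ∈ ['d', 'i', 'o', 'u', 'x', 'X', 'e', 'E', 'f', 'F', 'g', 'G'] then
      '0' :: '%' :: 's' :: escScanL t
    else if a = '%' ∧ b ∈ ['c', 'r'] then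
      '%' :: 's' :: escScanL t
    else
      a :: escScanL (b :: t)

def escapeAnyToString_alt (text : String) : String :=
  String.ofList (escScanL text.toList)

-- ===== PRECONDITION & SPEC =====
def Spec_escapeAnyToString (text : String) (out : String) : Prop := out = escapeAnyToString_alt text
instance (text : String) (out : String) : Decidable (Spec_escapeAnyToString text out) := by unfold Spec_escapeAnyToString; infer_instance

-- ===== CLAIM (what is proved, stated in full; the proofs are below) =====
def Claim_equal_escapeAnyToString : Prop := ∀ (text : String), Dom_escapeAnyToString text → Spec_escapeAnyToString text (escapeAnyToString text)

-- ===== LEMMAS AND PROOFS =====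

-- A single text.replace pass for a two-character pattern '%' :: c, as a structural scan.
def rep1 (c : Char) (new : List Char) : List Char → List Char
  | [] => []
  | [a] => [a]
  | a :: b :: t =>
    if a = '%' ∧ b = c then new ++ rep1 c new t
    else a :: rep1 c new (b :: t)

lemma rep1_cons_ne (c : Char) (new : List Char) (a : Char) (l : List Char) (h : a ≠ '%') :
    rep1 c new (a :: l) = a :: rep1 c new l := by
  cases l with
  | nil => rfl
  | cons b t => simp [rep1, h]

lemma rep1_pct_of_head (c : Char) (new : List Char) (l : List Char) (h : l.head? ≠ some c) :
    rep1 c new ('%' :: l) = '%' :: rep1 c new l := by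
  cases l with
  | nil => rfl
  | cons b t =>
    have hb : b ≠ c := by simpa using h
    simp [rep1, hb]

lemma rep1_pct_self (c : Char) (new : List Char) (t : List Char) :
    rep1 c new ('%' :: c :: t) = new ++ rep1 c new t := by
  simp [rep1]

lemma head?_rep1 (c : Char) (new : List Char) (l : List Char) (hn : new ≠ []) :
    (rep1 c new l).head? = l.head? ∨ (rep1 c new l).head? = new.head? := by
  cases l with
  | nil => left; rfl
  | cons a t =>
    cases t with
    | nil => left; rfl
    | cons b t' =>
      by_cases h : a = '%' ∧ b = c
      · right
        simp [rep1, h, List.head?_append_of_ne_nil _ hn]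
      · left
        simp [rep1, h]

-- Python's text.replace(old, new) for old = '%' + c equals the structural scan rep1.
lemma replace_go_eq (c : Char) (new : List Char) :
    ∀ (fuel : Nat) (l acc : List Char), l.length ≤ fuel →
      PySem.Chars.replace.go ['%', c] new fuel l acc = acc.reverse ++ rep1 c new l := by
  intro fuel
  induction fuel with
  | zero =>
    intro l acc h
    have : l = [] := by cases l <;> simp_all
    subst this
    simp [PySem.Chars.replace.go, rep1]
  | succ n ih =>
    intro l acc h
    cases l with
    | nil => simp [PySem.Chars.replace.go, rep1]
    | cons a t =>
      cases t with
      | nil =>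
        have : ¬ (List.isPrefixOf ['%', c] [a] = true) := by
          simp [List.isPrefixOf]
        simp only [PySem.Chars.replace.go, this]
        rw [ih [] (a :: acc) (by simp)]
        simp [rep1]
      | cons b t' =>
        by_cases hp : a = '%' ∧ b = c
        · have hpre : List.isPrefixOf ['%', c] (a :: b :: t') = true := by
            simp [List.isPrefixOf, hp.1, hp.2]
          simp only [PySem.Chars.replace.go, hpre]
          rw [show List.drop (['%', c].length) (a :: b :: t') = t' from rfl]
          rw [ih t' (new.reverse ++ acc) (by simp at h ⊢; omega)]
          simp [rep1, hp.1, hp.2]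
        · have hpre : ¬ (List.isPrefixOf ['%', c] (a :: b :: t') = true) := by
            intro hcontra
            simp only [List.isPrefixOf, Bool.and_true, Bool.and_eq_true,
              beq_iff_eq] at hcontra
            exact hp ⟨hcontra.1.symm, hcontra.2.symm⟩
          simp only [PySem.Chars.replace.go, hpre]
          rw [ih (b :: t') (a :: acc) (by simp at h ⊢; omega)]
          simp [rep1, hp]

lemma replace_eq_rep1 (c : Char) (new l : List Char) :
    PySem.Chars.replace l ['%', c] new = rep1 c new l := by
  rw [PySem.Chars.replace]
  simp only [List.isEmpty_cons, if_neg (by decide : ¬ (false = true))]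
  rw [replace_go_eq c new l.length l [] le_rfl]
  simp

-- The 14 (specifier letter, replacement) stages of A, as one list, applied left to right.
def pvStages : List (Char × List Char) :=
  [('d', ['0','%','s']), ('i', ['0','%','s']), ('o', ['0','%','s']), ('u', ['0','%','s']),
   ('x', ['0','%','s']), ('X', ['0','%','s']), ('e', ['0','%','s']), ('E', ['0','%','s']),
   ('f', ['0','%','s']), ('F', ['0','%','s']), ('g', ['0','%','s']), ('G', ['0','%','s']),
   ('c', ['%','s']), ('r', ['%','s'])]

def pvF (ss : List (Char × List Char)) (l : List Char) : List Char :=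
  ss.foldl (fun acc p => rep1 p.1 p.2 acc) l

lemma pvF_nil (ss : List (Char × List Char)) : pvF ss [] = [] := by
  induction ss with
  | nil => rfl
  | cons p ss ih => simpa [pvF, rep1] using ih

lemma pvF_singleton (ss : List (Char × List Char)) (a : Char) : pvF ss [a] = [a] := by
  induction ss with
  | nil => rfl
  | cons p ss ih => simpa [pvF, rep1] using ih

lemma pvF_cons_ne (ss : List (Char × List Char)) (a : Char) (h : a ≠ '%') :
    ∀ l, pvF ss (a :: l) = a :: pvF ss l := by
  induction ss with
  | nil => intro l; rfl
  | cons p ss ih =>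
    intro l
    simp only [pvF, List.foldl_cons]
    rw [rep1_cons_ne p.1 p.2 a l h]
    exact ih (rep1 p.1 p.2 l)

-- pushing a '%' that is followed by a fixed non-specifier character through all stages
lemma pvF_pct_fixed (h : Char) (hne : h ≠ '%') :
    ∀ (ss : List (Char × List Char)), (∀ p ∈ ss, p.1 ≠ h) →
      ∀ rest, pvF ss ('%' :: h :: rest) = '%' :: h :: pvF ss rest := by
  intro ss
  induction ss with
  | nil => intro _ rest; rfl
  | cons p ss ih =>
    intro hk rest
    simp only [pvF, List.foldl_cons]
    rw [rep1_pct_of_head p.1 p.2 (h :: rest) (by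
      simp only [List.head?_cons, ne_eq, Option.some.injEq]
      intro hh
      exact (hk p (List.mem_cons_self)) (hh ▸ rfl))]
    rw [rep1_cons_ne p.1 p.2 h rest hne]
    exact ih (fun q hq => hk q (List.mem_cons_of_mem p hq)) (rep1 p.1 p.2 rest)

def pvGoodStage (p : Char × List Char) : Prop :=
  p.1 ≠ '%' ∧ p.1 ≠ '0' ∧ p.2 ≠ [] ∧ (p.2.head? = some '0' ∨ p.2.head? = some '%')

-- pushing a '%' through all stages when the rest starts with '%' or '0' (never a specifier letter)
lemma pvF_pct_safe :
    ∀ (ss : List (Char × List Char)), (∀ p ∈ ss, pvGoodStage p) →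
      ∀ l, (l.head? = some '%' ∨ l.head? = some '0') →
        pvF ss ('%' :: l) = '%' :: pvF ss l ∧
          ((pvF ss l).head? = some '%' ∨ (pvF ss l).head? = some '0') := by
  intro ss
  induction ss with
  | nil => intro _ l hl; exact ⟨rfl, hl⟩
  | cons p ss ih =>
    intro hg l hl
    obtain ⟨hp1, hp0, hpn, hph⟩ := hg p (List.mem_cons_self)
    have hhead : l.head? ≠ some p.1 := by
      rcases hl with h | h <;> rw [h] <;> simp <;> intro hc
      · exact hp1 hc.symm
      · exact hp0 hc.symm
    have hstep := rep1_pct_of_head p.1 p.2 l hhead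
    have hnext : (rep1 p.1 p.2 l).head? = some '%' ∨ (rep1 p.1 p.2 l).head? = some '0' := by
      rcases head?_rep1 p.1 p.2 l hpn with h | h
      · rw [h]; exact hl
      · rw [h]; rcases hph with hh | hh
        · right; exact hh
        · left; exact hh
    have := ih (fun q hq => hg q (List.mem_cons_of_mem p hq)) (rep1 p.1 p.2 l) hnext
    refine ⟨?_, this.2⟩
    simp only [pvF, List.foldl_cons]
    rw [hstep]
    exact this.1

lemma pvF_stages_pct_pct (t : List Char) :
    pvF pvStages ('%' :: '%' :: t) = '%' :: pvF pvStages ('%' :: t) := by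
  have hg : ∀ p ∈ pvStages, pvGoodStage p := by
    intro p hp
    fin_cases hp <;> exact ⟨by decide, by decide, by decide, by decide⟩
  exact (pvF_pct_safe pvStages hg ('%' :: t) (by simp)).1

-- one fired stage, in context: the stages before key b leave '%' :: b alone, stage b fires,
-- the stages after b pass over the emitted replacement (its chars '0' '%' 's' match no key)
lemma pvF_fire (pre post : List (Char × List Char)) (b : Char) (nb t : List Char)
    (hsplit : pvStages = pre ++ (b, nb) :: post)
    (hb : b ≠ '%') (hpre : ∀ p ∈ pre, p.1 ≠ b)
    (hnb : ∀ X, pvF post (nb ++ X) = nb ++ pvF post X) :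
    pvF pvStages ('%' :: b :: t) = nb ++ pvF pvStages t := by
  rw [hsplit]
  have h1 : ∀ l, pvF (pre ++ (b, nb) :: post) l = pvF post (rep1 b nb (pvF pre l)) := by
    intro l; simp [pvF, List.foldl_append]
  rw [h1, h1]
  rw [pvF_pct_fixed b hb pre hpre t]
  rw [rep1_pct_self b nb (pvF pre t)]
  exact hnb (rep1 b nb (pvF pre t))

-- the replacement "0%s" passes unchanged through stages whose keys avoid '%', 's'
lemma pvF_pass_zrep (ss : List (Char × List Char)) (hs : ∀ p ∈ ss, p.1 ≠ 's') (X : List Char) :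
    pvF ss (['0','%','s'] ++ X) = ['0','%','s'] ++ pvF ss X := by
  show pvF ss ('0' :: '%' :: 's' :: X) = '0' :: '%' :: 's' :: pvF ss X
  rw [pvF_cons_ne ss '0' (by decide), pvF_pct_fixed 's' (by decide) ss hs X]

lemma pvF_pass_srep (ss : List (Char × List Char)) (hs : ∀ p ∈ ss, p.1 ≠ 's') (X : List Char) :
    pvF ss (['%','s'] ++ X) = ['%','s'] ++ pvF ss X := by
  show pvF ss ('%' :: 's' :: X) = '%' :: 's' :: pvF ss X
  rw [pvF_pct_fixed 's' (by decide) ss hs X]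

-- main equivalence on lists: the 14 sequential replace passes equal the single scan
set_option maxHeartbeats 1600000 in
lemma pvF_eq_scan : ∀ (l : List Char), pvF pvStages l = escScanL l := by
  intro l
  induction hn : l.length using Nat.strong_induction_on generalizing l with
  | _ n ih =>
  cases l with
  | nil => simp [pvF_nil, escScanL]
  | cons a t =>
    cases t with
    | nil => simp [pvF_singleton, escScanL]
    | cons b t' =>
      have iht' : pvF pvStages t' = escScanL t' :=
        ih t'.length (by subst hn; simp only [List.length_cons]; omega) t' rfl
      have ihbt' : pvF pvStages (b :: t') = escScanL (b :: t') :=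
        ih (b :: t').length (by subst hn; simp only [List.length_cons]; omega) (b :: t') rfl
      by_cases ha : a = '%'
      · subst ha
        by_cases hz : b ∈ ['d', 'i', 'o', 'u', 'x', 'X', 'e', 'E', 'f', 'F', 'g', 'G']
        · have hscan : escScanL ('%' :: b :: t') = '0' :: '%' :: 's' :: escScanL t' := by
            simp [escScanL, hz]
          rw [hscan, ← iht']
          fin_cases hz
          · exact pvF_fire [] _ 'd' ['0','%','s'] t' rfl (by decide) (by decide)
              (pvF_pass_zrep _ (by decide))
          · exact pvF_fire [('d', ['0','%','s'])] _ 'i' ['0','%','s'] t' rfl (by decide) (by decide)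
              (pvF_pass_zrep _ (by decide))
          · exact pvF_fire [('d', ['0','%','s']), ('i', ['0','%','s'])] _ 'o' ['0','%','s'] t' rfl
              (by decide) (by decide) (pvF_pass_zrep _ (by decide))
          · exact pvF_fire [('d', ['0','%','s']), ('i', ['0','%','s']), ('o', ['0','%','s'])] _ 'u'
              ['0','%','s'] t' rfl (by decide) (by decide) (pvF_pass_zrep _ (by decide))
          · exact pvF_fire [('d', ['0','%','s']), ('i', ['0','%','s']), ('o', ['0','%','s']),
              ('u', ['0','%','s'])] _ 'x' ['0','%','s'] t' rfl (by decide) (by decide)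
              (pvF_pass_zrep _ (by decide))
          · exact pvF_fire [('d', ['0','%','s']), ('i', ['0','%','s']), ('o', ['0','%','s']),
              ('u', ['0','%','s']), ('x', ['0','%','s'])] _ 'X' ['0','%','s'] t' rfl (by decide)
              (by decide) (pvF_pass_zrep _ (by decide))
          · exact pvF_fire [('d', ['0','%','s']), ('i', ['0','%','s']), ('o', ['0','%','s']),
              ('u', ['0','%','s']), ('x', ['0','%','s']), ('X', ['0','%','s'])] _ 'e' ['0','%','s']
              t' rfl (by decide) (by decide) (pvF_pass_zrep _ (by decide))
          · exact pvF_fire [('d', ['0','%','s']), ('i', ['0','%','s']), ('o', ['0','%','s']),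
              ('u', ['0','%','s']), ('x', ['0','%','s']), ('X', ['0','%','s']), ('e', ['0','%','s'])]
              _ 'E' ['0','%','s'] t' rfl (by decide) (by decide) (pvF_pass_zrep _ (by decide))
          · exact pvF_fire [('d', ['0','%','s']), ('i', ['0','%','s']), ('o', ['0','%','s']),
              ('u', ['0','%','s']), ('x', ['0','%','s']), ('X', ['0','%','s']), ('e', ['0','%','s']),
              ('E', ['0','%','s'])] _ 'f' ['0','%','s'] t' rfl (by decide) (by decide)
              (pvF_pass_zrep _ (by decide))
          · exact pvF_fire [('d', ['0','%','s']), ('i', ['0','%','s']), ('o', ['0','%','s']),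
              ('u', ['0','%','s']), ('x', ['0','%','s']), ('X', ['0','%','s']), ('e', ['0','%','s']),
              ('E', ['0','%','s']), ('f', ['0','%','s'])] _ 'F' ['0','%','s'] t' rfl (by decide)
              (by decide) (pvF_pass_zrep _ (by decide))
          · exact pvF_fire [('d', ['0','%','s']), ('i', ['0','%','s']), ('o', ['0','%','s']),
              ('u', ['0','%','s']), ('x', ['0','%','s']), ('X', ['0','%','s']), ('e', ['0','%','s']),
              ('E', ['0','%','s']), ('f', ['0','%','s']), ('F', ['0','%','s'])] _ 'g' ['0','%','s']
              t' rfl (by decide) (by decide) (pvF_pass_zrep _ (by decide))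
          · exact pvF_fire [('d', ['0','%','s']), ('i', ['0','%','s']), ('o', ['0','%','s']),
              ('u', ['0','%','s']), ('x', ['0','%','s']), ('X', ['0','%','s']), ('e', ['0','%','s']),
              ('E', ['0','%','s']), ('f', ['0','%','s']), ('F', ['0','%','s']), ('g', ['0','%','s'])]
              _ 'G' ['0','%','s'] t' rfl (by decide) (by decide) (pvF_pass_zrep _ (by decide))
        · by_cases hs : b ∈ ['c', 'r']
          · have hscan : escScanL ('%' :: b :: t') = '%' :: 's' :: escScanL t' := by
              simp [escScanL, hz, hs]
            rw [hscan, ← iht']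
            fin_cases hs
            · exact pvF_fire [('d', ['0','%','s']), ('i', ['0','%','s']), ('o', ['0','%','s']),
                ('u', ['0','%','s']), ('x', ['0','%','s']), ('X', ['0','%','s']), ('e', ['0','%','s']),
                ('E', ['0','%','s']), ('f', ['0','%','s']), ('F', ['0','%','s']), ('g', ['0','%','s']),
                ('G', ['0','%','s'])] _ 'c' ['%','s'] t' rfl (by decide) (by decide)
                (pvF_pass_srep _ (by decide))
            · exact pvF_fire [('d', ['0','%','s']), ('i', ['0','%','s']), ('o', ['0','%','s']),
                ('u', ['0','%','s']), ('x', ['0','%','s']), ('X', ['0','%','s']), ('e', ['0','%','s']),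
                ('E', ['0','%','s']), ('f', ['0','%','s']), ('F', ['0','%','s']), ('g', ['0','%','s']),
                ('G', ['0','%','s']), ('c', ['%','s'])] _ 'r' ['%','s'] t' rfl (by decide) (by decide)
                (pvF_pass_srep _ (by decide))
          · have hscan : escScanL ('%' :: b :: t') = '%' :: escScanL (b :: t') := by
              simp only [escScanL]
              rw [if_neg (by simp [hz]), if_neg (by simp [hs])]
            rw [hscan, ← ihbt']
            by_cases hbp : b = '%'
            · subst hbp
              exact pvF_stages_pct_pct t'
            · have hmem : ∀ p ∈ pvStages,
                  p.1 ∈ ['d', 'i', 'o', 'u', 'x', 'X', 'e', 'E', 'f', 'F', 'g', 'G'] ∨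
                  p.1 ∈ ['c', 'r'] := by decide
              have hkeys : ∀ p ∈ pvStages, p.1 ≠ b := by
                intro p hp hc
                rcases hmem p hp with h | h
                · exact hz (hc ▸ h)
                · exact hs (hc ▸ h)
              rw [pvF_pct_fixed b hbp pvStages hkeys t']
              rw [pvF_cons_ne pvStages b hbp t']
      · have hscan : escScanL (a :: b :: t') = a :: escScanL (b :: t') := by
          simp only [escScanL]
          rw [if_neg (by simp [ha]), if_neg (by simp [ha])]
        rw [hscan, ← ihbt']
        exact pvF_cons_ne pvStages a ha (b :: t')

-- A's port, moved to the character-list level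
lemma escA_toList (text : String) : (escapeAnyToString text).toList = pvF pvStages text.toList := by
  show (escapeAnyToString text).toList = _
  simp only [escapeAnyToString, List.map_cons, List.map_nil, List.foldl_cons, List.foldl_nil]
  simp only [PySem.Str.toList_replace]
  simp only [show ("%d".toList) = ['%','d'] from rfl, show ("%i".toList) = ['%','i'] from rfl,
    show ("%o".toList) = ['%','o'] from rfl, show ("%u".toList) = ['%','u'] from rfl,
    show ("%x".toList) = ['%','x'] from rfl, show ("%X".toList) = ['%','X'] from rfl,
    show ("%e".toList) = ['%','e'] from rfl, show ("%E".toList) = ['%','E'] from rfl,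
    show ("%f".toList) = ['%','f'] from rfl, show ("%F".toList) = ['%','F'] from rfl,
    show ("%g".toList) = ['%','g'] from rfl, show ("%G".toList) = ['%','G'] from rfl,
    show ("%c".toList) = ['%','c'] from rfl, show ("%r".toList) = ['%','r'] from rfl,
    show ("0%s".toList) = ['0','%','s'] from rfl, show ("%s".toList) = ['%','s'] from rfl]
  simp only [replace_eq_rep1]
  simp only [pvF, pvStages, List.foldl_cons, List.foldl_nil]

-- ===== VERDICT (by name: the statement is the Claim_ definition above) =====
theorem escapeAnyToString_spec : Claim_equal_escapeAnyToString := by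
  intro text _
  show escapeAnyToString text = escapeAnyToString_alt text
  have h : (escapeAnyToString text).toList = (escapeAnyToString_alt text).toList := by
    rw [escA_toList, pvF_eq_scan]
    simp [escapeAnyToString_alt]
  exact String.toList_inj.mp h
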